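-- pv_equiv track=rewrite | github.com/sbamboo/crosshell_modulo | core/cslib/smartInputCompleters.py | has_unclosed_brackets
-- ===== SOURCE A (Python) =====
-- def remove_sections_within_quotes(s):
--     result = []
--     inside_quotes = False
--     current_quote = None
--
--     for char in s:
--         if char == "'" or char == '"':
--             if not inside_quotes:
--                 inside_quotes = True
--                 current_quote = char
--             elif current_quote == char:
--                 inside_quotes = False
--                 current_quote = None
--         elif not inside_quotes:
--             result.append(char)
--
--     return ''.join(result)
--
-- def has_unclosed_brackets(s):
--     # Remove sections within quotes
--     s_without_quotes = remove_sections_within_quotes(s)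
--
--     # Check for unclosed brackets in the modified string
--     stack_brackets = []
--
--     for char in s_without_quotes:
--         if char == '{':
--             stack_brackets.append(char)
--         elif char == '}':
--             if not stack_brackets:
--                 return True  # Found a closing bracket without a matching opening bracket
--             stack_brackets.pop()
--
--     return bool(stack_brackets)
-- ===== SOURCE B (Python) =====
-- def has_unclosed_brackets(s):
--     inside_quotes = False
--     current_quote = None
--     depth = 0
--     for char in s:
--         if char == "'" or char == '"':
--             if not inside_quotes:
--                 inside_quotes = True
--                 current_quote = char
--             elif current_quote == char:
--                 inside_quotes = False
--                 current_quote = None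
--         elif not inside_quotes:
--             if char == '{':
--                 depth += 1
--             elif char == '}':
--                 if depth == 0:
--                     return True
--                 depth -= 1
--     return depth > 0
-- ===== Notes on version B (the rewrite author's own statement) =====
-- stated objective: simpler
-- what changed: Fused A's two phases (build a quote-stripped copy of the string, then scan it with a character stack) into one single pass that keeps quote state and an integer bracket depth, building no intermediate string and no stack.
import Mathlib
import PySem

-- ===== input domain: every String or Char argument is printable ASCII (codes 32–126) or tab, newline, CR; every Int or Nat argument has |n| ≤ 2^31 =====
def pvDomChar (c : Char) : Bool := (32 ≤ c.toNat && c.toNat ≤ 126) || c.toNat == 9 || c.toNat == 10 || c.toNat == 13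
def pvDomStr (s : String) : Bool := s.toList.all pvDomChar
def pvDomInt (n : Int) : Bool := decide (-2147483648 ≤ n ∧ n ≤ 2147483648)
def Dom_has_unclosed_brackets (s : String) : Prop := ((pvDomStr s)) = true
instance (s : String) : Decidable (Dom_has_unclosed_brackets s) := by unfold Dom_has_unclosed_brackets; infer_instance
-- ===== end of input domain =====

-- B fuses A's two phases (quote-stripping pass, then bracket-stack pass) into one
-- single pass with a quote state and an integer depth; objective: simpler (O(1) extra space).


-- ===== PORT A =====
-- remove_sections_within_quotes: structural recursion over the characters with the
-- same state (inside_quotes, current_quote); the appended chars become the result list.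
def pvRsq : List Char → Bool → Option Char → List Char
  | [], _, _ => []
  | c :: r, inside, q =>
    if c = '\'' ∨ c = '"' then
      if !inside then pvRsq r true (some c)
      else if q = some c then pvRsq r false none
      else pvRsq r inside q
    else if !inside then c :: pvRsq r inside q
    else pvRsq r inside q

-- the bracket loop of A: stack_brackets, append at the end, pop the last element
def pvBrk : List Char → List Char → Bool
  | [], st => !st.isEmpty
  | c :: r, st =>
    if c = '{' then pvBrk r (st ++ [c])
    else if c = '}' then (if st = [] then true else pvBrk r st.dropLast)
    else pvBrk r st

def has_unclosed_brackets (s : String) : Bool :=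
  pvBrk (pvRsq s.toList false none) []

-- ===== PORT B =====
-- one fused loop: (inside_quotes, current_quote, depth); early return True on '}' at depth 0
def pvAltLoop : List Char → Bool → Option Char → Nat → Bool
  | [], _, _, depth => decide (depth > 0)
  | c :: r, inside, q, depth =>
    if c = '\'' ∨ c = '"' then
      if !inside then pvAltLoop r true (some c) depth
      else if q = some c then pvAltLoop r false none depth
      else pvAltLoop r inside q depth
    else if inside then pvAltLoop r inside q depth
    else if c = '{' then pvAltLoop r inside q (depth + 1)
    else if c = '}' then (if depth = 0 then true else pvAltLoop r inside q (depth - 1))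
    else pvAltLoop r inside q depth

def has_unclosed_brackets_alt (s : String) : Bool :=
  pvAltLoop s.toList false none 0

-- ===== PRECONDITION & SPEC =====
def Spec_has_unclosed_brackets (s : String) (out : Bool) : Prop := out = has_unclosed_brackets_alt s
instance (s : String) (out : Bool) : Decidable (Spec_has_unclosed_brackets s out) := by unfold Spec_has_unclosed_brackets; infer_instance

-- ===== CLAIM (what is proved, stated in full; the proofs are below) =====
def Claim_equal_has_unclosed_brackets : Prop := ∀ (s : String), Dom_has_unclosed_brackets s → Spec_has_unclosed_brackets s (has_unclosed_brackets s)

-- ===== LEMMAS AND PROOFS =====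

-- The fused loop run with depth = |st| computes what A's bracket loop computes on the
-- quote-stripped remainder, for any stack st (whose contents are irrelevant: A only
-- pushes '{' and only the length matters).
theorem pvAltLoop_eq_brk_rsq :
    ∀ (l : List Char) (inside : Bool) (q : Option Char) (st : List Char),
      pvAltLoop l inside q st.length = pvBrk (pvRsq l inside q) st := by
  intro l
  induction l with
  | nil =>
    intro inside q st
    simp [pvAltLoop, pvRsq, pvBrk]
    cases st <;> simp
  | cons c r ih =>
    intro inside q st
    by_cases hq : c = '\'' ∨ c = '"'
    · -- quote character: both sides toggle the quote state identically
      cases inside with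
      | false => simp [pvAltLoop, pvRsq, hq, ih]
      | true =>
        by_cases hm : q = some c <;>
          simp [pvAltLoop, pvRsq, hq, hm, ih]
    · cases inside with
      | true => simp [pvAltLoop, pvRsq, hq, ih]
      | false =>
        by_cases ho : c = '{'
        · have h1 : pvBrk (pvRsq (c :: r) false q) st
              = pvBrk (pvRsq r false q) (st ++ [c]) := by
            simp [pvRsq, pvBrk, hq, ho]
          rw [h1, ← ih false q (st ++ [c])]
          simp [pvAltLoop, hq, ho]
        · by_cases hc : c = '}'
          · have h1 : pvBrk (pvRsq (c :: r) false q) st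
                = (if st = [] then true else pvBrk (pvRsq r false q) st.dropLast) := by
              simp [pvRsq, pvBrk, hq, ho, hc]
            rw [h1]
            by_cases hst : st = []
            · simp [pvAltLoop, hq, ho, hc, hst]
            · have hlen : st.length ≠ 0 := by simpa [List.length_eq_zero_iff] using hst
              have h2 : st.length - 1 = st.dropLast.length := by
                simp [List.length_dropLast]
              rw [if_neg hst]
              have hstep : pvAltLoop (c :: r) false q st.length
                  = pvAltLoop r false q (st.length - 1) := by
                simp [pvAltLoop, hq, ho, hc, hlen]
              rw [hstep, h2, ih]
          · simp [pvAltLoop, pvRsq, pvBrk, hq, ho, hc, ih]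

-- ===== VERDICT (by name: the statement is the Claim_ definition above) =====
theorem has_unclosed_brackets_spec : Claim_equal_has_unclosed_brackets := by
  intro s _
  unfold Spec_has_unclosed_brackets has_unclosed_brackets has_unclosed_brackets_alt
  have h := pvAltLoop_eq_brk_rsq s.toList false none []
  simpa using h.symm
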